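-- pv_equiv track=rewrite | github.com/spbgithub/projecteuler | pe003.py | int_to_list
-- ===== SOURCE A (Python) =====
-- def int_to_list(n):
-- 	ret_list = []
-- 	ret_list2 = []
-- 	nlocal = n
-- 	r = 0
-- 	while (nlocal > 0):
-- 		r = nlocal % 10
-- 		ret_list.append(r)
-- 		ret_list2.append(r)
-- 		nlocal = (nlocal - r)//10
-- 	return ret_list, ret_list2
-- ===== SOURCE B (Python) =====
-- def int_to_list(n):
--     if n <= 0:
--         return [], []
--     digits = [ord(c) - 48 for c in str(n)][::-1]
--     return digits, list(digits)
-- ===== Notes on version B (the rewrite author's own statement) =====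
-- stated objective: idiomatic
-- what changed: Replaces the arithmetic mod/div digit loop with string-based extraction: str(n) is mapped to digit values and reversed to least-significant-first order.
import Mathlib
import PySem

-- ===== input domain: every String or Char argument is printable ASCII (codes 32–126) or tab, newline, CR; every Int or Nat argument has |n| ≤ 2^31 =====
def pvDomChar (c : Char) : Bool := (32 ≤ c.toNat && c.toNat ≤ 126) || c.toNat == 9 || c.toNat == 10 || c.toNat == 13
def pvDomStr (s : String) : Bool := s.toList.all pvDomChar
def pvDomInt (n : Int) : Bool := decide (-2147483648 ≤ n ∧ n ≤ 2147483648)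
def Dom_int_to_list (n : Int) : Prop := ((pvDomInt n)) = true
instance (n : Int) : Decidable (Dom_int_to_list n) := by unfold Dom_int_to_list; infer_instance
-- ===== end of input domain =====

-- B extracts digits via str(n) instead of A's mod/div loop (idiomatic; same cost).


-- ===== PORT A =====
-- the while loop: nlocal, ret_list, ret_list2 are the loop state
def int_to_list_loop (nlocal : Int) (l1 l2 : List Int) : List Int × List Int :=
  if _h : nlocal > 0 then
    let r := PySem.Int.mod nlocal 10
    int_to_list_loop (PySem.Int.floordiv (nlocal - r) 10) (l1 ++ [r]) (l2 ++ [r])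
  else (l1, l2)
termination_by nlocal.toNat
decreasing_by
  have h10 : (0:Int) < 10 := by omega
  rw [PySem.Int.mod_eq_emod_of_pos h10, PySem.Int.floordiv_eq_ediv_of_pos h10]
  omega

def int_to_list (n : Int) : List Int × List Int :=
  int_to_list_loop n [] []

-- ===== PORT B =====
def int_to_list_alt (n : Int) : List Int × List Int :=
  if n ≤ 0 then ([], [])
  else
    let digits := ((PySem.Int.toStr n).toList.map (fun c => (c.toNat : Int) - 48)).reverse
    (digits, digits)

-- ===== PRECONDITION & SPEC =====
def Spec_int_to_list (n : Int) (out : List Int × List Int) : Prop := out = int_to_list_alt n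
instance (n : Int) (out : List Int × List Int) : Decidable (Spec_int_to_list n out) := by unfold Spec_int_to_list; infer_instance

-- ===== CLAIM (what is proved, stated in full; the proofs are below) =====
def Claim_equal_int_to_list : Prop := ∀ (n : Int), Dom_int_to_list n → Spec_int_to_list n (int_to_list n)

-- ===== LEMMAS AND PROOFS =====

-- the common description: base-10 digits of n, least significant first
def pvDigits (n : Int) : List Int := (Nat.digits 10 n.toNat).map (fun (d : Nat) => (d : Int))

theorem loop_eq_digits (n : Int) : ∀ l1 l2 : List Int,
    int_to_list_loop n l1 l2 = (l1 ++ pvDigits n, l2 ++ pvDigits n) := by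
  have h10 : (0:Int) < 10 := by omega
  induction n using int_to_list_loop.induct (l1 := []) (l2 := []) with
  | case1 nlocal _ _ h r ih =>
    intro l1 l2
    rw [int_to_list_loop]
    simp only [h, dite_true]
    rw [ih]
    have hr : r = nlocal % 10 := PySem.Int.mod_eq_emod_of_pos h10
    have hfd : PySem.Int.floordiv (nlocal - r) 10 = (nlocal - r) / 10 :=
      PySem.Int.floordiv_eq_ediv_of_pos h10
    have hdig : pvDigits nlocal = r :: pvDigits (PySem.Int.floordiv (nlocal - r) 10) := by
      have h1 : (PySem.Int.floordiv (nlocal - r) 10).toNat = nlocal.toNat / 10 := by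
        rw [hfd, hr]; omega
      have h2 : r = ((nlocal.toNat % 10 : Nat) : Int) := by rw [hr]; omega
      unfold pvDigits
      rw [h1, Nat.digits_def' (by norm_num : 1 < 10) (by omega : 0 < nlocal.toNat),
        List.map_cons, ← h2]
    rw [hdig]
    simp only [List.append_assoc, List.singleton_append]
    rfl
  | case2 nlocal _ _ h =>
    intro l1 l2
    rw [int_to_list_loop]
    simp only [h, dite_false]
    have hz : pvDigits nlocal = [] := by
      unfold pvDigits
      have : nlocal.toNat = 0 := by omega
      simp [this]
    simp [hz]

theorem digitChar_toNat {d : Nat} (hd : d < 10) : ((Nat.digitChar d).toNat : Int) - 48 = d := by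
  interval_cases d <;> rfl

theorem toDigitsCore_eq (fuel : Nat) : ∀ (n : Nat) (ds : List Char), 0 < n → n ≤ fuel →
    Nat.toDigitsCore 10 fuel n ds = ((Nat.digits 10 n).map Nat.digitChar).reverse ++ ds := by
  induction fuel with
  | zero => intro n ds h1 h2; omega
  | succ fuel ih =>
    intro n ds h1 h2
    rw [Nat.toDigitsCore]
    rw [Nat.digits_def' (by norm_num : 1 < 10) h1]
    by_cases hz : n / 10 = 0
    · simp only [hz, if_true]
      simp
    · simp only [hz, if_false]
      rw [ih (n / 10) _ (by omega) (by omega)]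
      simp

theorem map_digitChar_digits (m : Nat) :
    (Nat.digits 10 m).map ((fun c => ((c.toNat : Int) - 48)) ∘ Nat.digitChar)
      = (Nat.digits 10 m).map (fun (d : Nat) => (d : Int)) :=
  List.map_congr_left (fun d hd => digitChar_toNat (Nat.digits_lt_base (by norm_num) hd))

theorem alt_eq_digits (n : Int) : int_to_list_alt n = (pvDigits n, pvDigits n) := by
  unfold int_to_list_alt
  by_cases h : n ≤ 0
  · have hz : pvDigits n = [] := by
      unfold pvDigits
      have : n.toNat = 0 := by omega
      simp [this]
    simp [h, hz]
  · simp only [h, if_false]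
    rw [PySem.Int.toList_toStr]
    unfold PySem.Int.toChars
    rw [if_neg (by omega)]
    unfold Nat.toDigits
    rw [toDigitsCore_eq _ n.toNat [] (by omega) (by omega)]
    simp only [List.append_nil, List.map_reverse, List.reverse_reverse, List.map_map]
    rw [map_digitChar_digits]
    simp [pvDigits]

-- ===== VERDICT (by name: the statement is the Claim_ definition above) =====
theorem int_to_list_spec : Claim_equal_int_to_list := by
  intro n _
  unfold Spec_int_to_list int_to_list
  rw [loop_eq_digits, alt_eq_digits]
  simp
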